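-- pv_equiv track=rewrite | github.com/xyh0927/BU-Learning-F23 | METCS777O1/HW6/t2 copy.py | count_top100_words
-- ===== SOURCE A (Python) =====
-- from string import punctuation
--
-- def count_top100_words(doc_content, top20000):
--     words = doc_content.split()
--     word_counts = {}
--     for word in words:
--         word = word.lower().strip(punctuation)
--         if word in top20000[:100]:
--             word_counts[word] = word_counts.get(word, 0) + 1
--     return word_counts
-- ===== SOURCE B (Python) =====
-- from string import punctuation
--
-- def count_top100_words(doc_content, top20000):
--     # Normalize once; collect matched distinct words in first-encounter order;
--     # count each by scanning the normalized word list (no incremental dict counting).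
--     words = [w.lower().strip(punctuation) for w in doc_content.split()]
--     top100 = set(top20000[:100])
--     seen = []
--     for w in words:
--         if w in top100 and w not in seen:
--             seen.append(w)
--     return {w: words.count(w) for w in seen}
-- ===== Notes on version B (the rewrite author's own statement) =====
-- stated objective: alternative
-- what changed: B keeps no running counts at all: it normalizes the words once, collects the matched distinct words in first-encounter order, and then computes each word's count by scanning the normalized word list with list.count, instead of A's single pass that increments a dict entry per matched word while re-slicing top20000[:100] for every membership test.
import Mathlib
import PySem

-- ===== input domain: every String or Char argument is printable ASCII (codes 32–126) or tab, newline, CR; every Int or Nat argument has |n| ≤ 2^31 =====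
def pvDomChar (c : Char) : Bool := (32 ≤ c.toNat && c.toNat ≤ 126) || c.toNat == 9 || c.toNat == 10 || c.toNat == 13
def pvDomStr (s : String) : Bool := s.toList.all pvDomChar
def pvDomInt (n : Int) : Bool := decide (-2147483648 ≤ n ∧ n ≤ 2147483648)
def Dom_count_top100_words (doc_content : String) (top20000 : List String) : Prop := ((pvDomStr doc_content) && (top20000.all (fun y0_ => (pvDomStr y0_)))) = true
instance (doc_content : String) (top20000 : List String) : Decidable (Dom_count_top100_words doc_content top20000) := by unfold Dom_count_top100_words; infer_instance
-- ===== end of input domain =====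

-- B keeps no running counts: it dedups the matched normalized words in first-encounter order and counts each by scanning the word list, instead of A's incremental dict counting with a per-word slice-membership test.


-- string.punctuation
def pvPunct : String := "!\"#$%&'()*+,-./:;<=>?@[\\]^_`{|}~"

-- ===== PORT A =====
def count_top100_words (doc_content : String) (top20000 : List String) : List (String × Int) :=
  let words := PySem.Str.split₀ doc_content
  (words.foldl (fun word_counts word =>
      let w := PySem.Str.stripChars (PySem.Str.lower word) pvPunct
      if (PySem.List.slice top20000 none (some 100)).contains w then
        word_counts.insert w (word_counts.getD w 0 + 1)
      else word_counts)
    PySem.Dict.empty).items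

-- ===== PORT B =====
def count_top100_words_alt (doc_content : String) (top20000 : List String) : List (String × Int) :=
  let words := (PySem.Str.split₀ doc_content).map
    (fun w => PySem.Str.stripChars (PySem.Str.lower w) pvPunct)
  let top100 := PySem.Set.ofList (PySem.List.slice top20000 none (some 100))
  let seen := words.foldl
    (fun s w => if PySem.Set.contains top100 w && !s.contains w then s ++ [w] else s) []
  seen.map (fun w => (w, (PySem.List.count words w : Int)))

-- ===== PRECONDITION & SPEC =====
def Spec_count_top100_words (doc_content : String) (top20000 : List String) (out : List (String × Int)) : Prop := out = count_top100_words_alt doc_content top20000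
instance (doc_content : String) (top20000 : List String) (out : List (String × Int)) : Decidable (Spec_count_top100_words doc_content top20000 out) := by unfold Spec_count_top100_words; infer_instance

-- ===== CLAIM (what is proved, stated in full; the proofs are below) =====
def Claim_equal_count_top100_words : Prop := ∀ (doc_content : String) (top20000 : List String), Dom_count_top100_words doc_content top20000 → Spec_count_top100_words doc_content top20000 (count_top100_words doc_content top20000)

-- ===== LEMMAS AND PROOFS =====

theorem contains_ofList {α : Type} [BEq α] [LawfulBEq α] (l : List α) (x : α) :
    PySem.Set.contains (PySem.Set.ofList l) x = l.contains x := by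
  by_cases hm : x ∈ l
  · rw [(PySem.Set.contains_iff _ _).mpr ((PySem.Set.mem_ofList _ _).mpr hm)]
    exact ((List.contains_iff_mem).mpr hm).symm
  · have h1 : ¬ PySem.Set.contains (PySem.Set.ofList l) x = true := by
      rw [PySem.Set.contains_iff, PySem.Set.mem_ofList]; exact hm
    have h2 : ¬ l.contains x = true := by rw [List.contains_iff_mem]; exact hm
    rw [Bool.not_eq_true] at h1 h2; rw [h1, h2]

-- A's counting loop, over any normalizer and test, is the counter of the filtered normalized words.
theorem foldA_eq (norm : String → String) (p : String → Bool) (ws : List String) :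
    ws.foldl (fun d word =>
        if p (norm word) then d.insert (norm word) (d.getD (norm word) 0 + 1) else d)
      PySem.Dict.empty
    = PySem.Dict.counter ((ws.map norm).filter p) := by
  rw [← PySem.Dict.foldl_insert_getD_add_one_eq_counter,
    ← PySem.List.foldl_if_eq_foldl_filter, List.foldl_map]

-- B's 'seen' loop is set(filter p L) in first-encounter order.
theorem seen_eq (p : String → Bool) (L : List String) :
    L.foldl (fun s w => if p w && !s.contains w then s ++ [w] else s) []
    = PySem.Set.ofList (L.filter p) := by
  have hfun : (fun (s : List String) w => if p w && !s.contains w then s ++ [w] else s)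
      = fun s w => if p w then PySem.Set.add s w else s := by
    funext s w
    by_cases hp : p w = true
    · simp only [hp, Bool.true_and, if_true, PySem.Set.add, PySem.Set.contains]
      by_cases hc : s.contains w = true
      · simp only [hc, Bool.not_true]; rfl
      · rw [Bool.not_eq_true] at hc; simp only [hc, Bool.not_false]; rfl
    · simp [hp]
  rw [hfun, PySem.List.foldl_if_eq_foldl_filter, PySem.Set.ofList_eq_foldl]

-- ===== VERDICT (by name: the statement is the Claim_ definition above) =====
theorem count_top100_words_spec : Claim_equal_count_top100_words := by
  intro doc top _
  unfold Spec_count_top100_words count_top100_words count_top100_words_alt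
  simp only []
  rw [foldA_eq (fun word => PySem.Str.stripChars (PySem.Str.lower word) pvPunct)
      (fun w => (PySem.List.slice top none (some 100)).contains w) (PySem.Str.split₀ doc)]
  set L := (PySem.Str.split₀ doc).map (fun word => PySem.Str.stripChars (PySem.Str.lower word) pvPunct) with hL
  set p : String → Bool := fun w => (PySem.List.slice top none (some 100)).contains w with hp
  have hp' : (fun w => PySem.Set.contains
      (PySem.Set.ofList (PySem.List.slice top none (some 100))) w) = p := by
    funext w; rw [hp]; exact contains_ofList _ w
  rw [PySem.Dict.items_counter]
  conv_rhs => rw [show (fun (s : List String) w =>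
      if PySem.Set.contains (PySem.Set.ofList (PySem.List.slice top none (some 100))) w
         && !s.contains w then s ++ [w] else s)
    = (fun s w => if p w && !s.contains w then s ++ [w] else s) by rw [← hp']]
  rw [seen_eq p L]
  apply (List.map_congr_left _).symm
  intro k hk
  have hpk : p k = true := List.of_mem_filter ((PySem.Set.mem_ofList _ _).mp hk)
  rw [PySem.List.count_eq, List.count_filter hpk]
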